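-- pv_equiv track=rewrite | github.com/liamcheney/Python_PhD | General_Scripts/2019-10-03-species_identifying_commonly_missing_alleles.py | calculate_missing_info
-- ===== SOURCE A (Python) =====
-- def calculate_missing_info(genome_alleles_dict, simple_out):
--     save_dict = {}
--
--     for key, value in genome_alleles_dict.items():
--
--         if simple_out:
--             zero_count = 0
--
--             for i in value:
--                 if ':0' in i:
--                     zero_count = zero_count + 1
--
--             save_dict[key] ={'zero' : zero_count}
--
--
--         else:
--
--             new_allele_count = 0
--             worked_allele_count = 0
--             exact_hit_count = 0
--             missing_count = 0
--             failed_filter_count = 0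
--             noblast_count = 0
--             duplication_count = 0
--             too_much_missing_count = 0
--             too_long_count = 0
--             for i in value:
--
--                 #handling missing alleles
--                 if ':0' in i:
--                     missing_count = missing_count + 1
--
--                     if 'failed_filter' in i:
--                         failed_filter_count = failed_filter_count + 1
--
--                     elif 'possible_duplication' in i:
--                         duplication_count = duplication_count + 1
--
--                     elif 'no_blast_hits' in i:
--                         noblast_count = noblast_count + 1
--
--                     elif 'unscorable_too_much_missing' in i:
--                         too_much_missing_count = too_much_missing_count + 1
--
--                     elif 'unscorable_too_long' in i:
--                         too_long_count = too_long_count + 1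
--
--                 #handling worked alleles
--                 if ':0' not in i:
--                     worked_allele_count = worked_allele_count + 1
--
--                     if 'new' in i:
--                         new_allele_count = new_allele_count + 1
--
--                     elif ':1' in i:
--                         exact_hit_count = exact_hit_count + 1
--
--
--             save_dict[key] ={'worked':worked_allele_count, 'new':new_allele_count, 'exact':exact_hit_count, 'unscorable_too_much_missing':too_much_missing_count, 'unscorable_too_long':too_long_count, 'no_blast_hits':noblast_count, 'possible_duplication':duplication_count, 'failed_filter':failed_filter_count}
--
--     return save_dict
-- ===== SOURCE B (Python) =====
-- def _classify(i):
--     """Map one allele string to a single fine-grained category label."""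
--     if ':0' in i:
--         if 'failed_filter' in i:
--             return 'failed_filter'
--         elif 'possible_duplication' in i:
--             return 'possible_duplication'
--         elif 'no_blast_hits' in i:
--             return 'no_blast_hits'
--         elif 'unscorable_too_much_missing' in i:
--             return 'unscorable_too_much_missing'
--         elif 'unscorable_too_long' in i:
--             return 'unscorable_too_long'
--         else:
--             return 'missing_other'
--     elif 'new' in i:
--         return 'new'
--     elif ':1' in i:
--         return 'exact'
--     else:
--         return 'worked_other'
--
--
-- def calculate_missing_info(genome_alleles_dict, simple_out):
--     save_dict = {}
--     for key, value in genome_alleles_dict.items():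
--         if simple_out:
--             save_dict[key] = {'zero': sum(1 for i in value if ':0' in i)}
--         else:
--             labels = [_classify(i) for i in value]
--             missing_total = (labels.count('failed_filter')
--                              + labels.count('possible_duplication')
--                              + labels.count('no_blast_hits')
--                              + labels.count('unscorable_too_much_missing')
--                              + labels.count('unscorable_too_long')
--                              + labels.count('missing_other'))
--             save_dict[key] = {
--                 'worked': len(labels) - missing_total,
--                 'new': labels.count('new'),
--                 'exact': labels.count('exact'),
--                 'unscorable_too_much_missing': labels.count('unscorable_too_much_missing'),
--                 'unscorable_too_long': labels.count('unscorable_too_long'),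
--                 'no_blast_hits': labels.count('no_blast_hits'),
--                 'possible_duplication': labels.count('possible_duplication'),
--                 'failed_filter': labels.count('failed_filter'),
--             }
--     return save_dict
-- ===== Notes on version B (the rewrite author's own statement) =====
-- stated objective: simpler
-- what changed: B classifies each allele into one label with a helper, tallies labels with list.count, and derives every output field (worked = total minus missing labels) from that frequency table, instead of A's nine named counters incremented inside nested if/elif branches.
import Mathlib
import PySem

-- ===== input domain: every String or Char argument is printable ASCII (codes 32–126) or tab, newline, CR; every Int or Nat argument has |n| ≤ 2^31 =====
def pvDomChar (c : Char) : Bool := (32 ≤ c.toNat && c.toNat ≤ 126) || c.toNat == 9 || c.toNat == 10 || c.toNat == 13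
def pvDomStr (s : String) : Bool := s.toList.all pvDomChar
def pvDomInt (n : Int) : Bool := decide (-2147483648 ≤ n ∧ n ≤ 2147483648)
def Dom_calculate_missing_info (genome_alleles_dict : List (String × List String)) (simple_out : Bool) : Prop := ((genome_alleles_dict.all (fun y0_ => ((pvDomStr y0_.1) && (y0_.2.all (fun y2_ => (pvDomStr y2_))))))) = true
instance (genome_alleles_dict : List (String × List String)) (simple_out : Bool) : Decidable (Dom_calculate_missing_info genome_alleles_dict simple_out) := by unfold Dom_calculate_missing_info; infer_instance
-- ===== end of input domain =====

-- B replaces A's nine named counters in nested branches by a classify-per-allele helper plus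
-- label tallies (list.count), deriving every output field from the frequency table: simpler decomposition.


-- ===== PORT A =====
-- A's inner loop state: (new, worked, exact, missing, failed_filter, noblast, duplication, too_much_missing, too_long)
def pvStepA (s : Int × Int × Int × Int × Int × Int × Int × Int × Int) (i : String) :
    Int × Int × Int × Int × Int × Int × Int × Int × Int :=
  let (new_c, worked, exact, missing, failed, noblast, dup, toomuch, toolong) := s
  -- handling missing alleles
  let (missing, failed, dup, noblast, toomuch, toolong) :=
    if PySem.Str.isIn ":0" i then
      if PySem.Str.isIn "failed_filter" i then (missing + 1, failed + 1, dup, noblast, toomuch, toolong)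
      else if PySem.Str.isIn "possible_duplication" i then (missing + 1, failed, dup + 1, noblast, toomuch, toolong)
      else if PySem.Str.isIn "no_blast_hits" i then (missing + 1, failed, dup, noblast + 1, toomuch, toolong)
      else if PySem.Str.isIn "unscorable_too_much_missing" i then (missing + 1, failed, dup, noblast, toomuch + 1, toolong)
      else if PySem.Str.isIn "unscorable_too_long" i then (missing + 1, failed, dup, noblast, toomuch, toolong + 1)
      else (missing + 1, failed, dup, noblast, toomuch, toolong)
    else (missing, failed, dup, noblast, toomuch, toolong)
  -- handling worked alleles
  let (worked, new_c, exact) :=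
    if !PySem.Str.isIn ":0" i then
      if PySem.Str.isIn "new" i then (worked + 1, new_c + 1, exact)
      else if PySem.Str.isIn ":1" i then (worked + 1, new_c, exact + 1)
      else (worked + 1, new_c, exact)
    else (worked, new_c, exact)
  (new_c, worked, exact, missing, failed, noblast, dup, toomuch, toolong)

def calculate_missing_info (genome_alleles_dict : List (String × List String)) (simple_out : Bool) : List (String × List (String × Int)) :=
  (genome_alleles_dict.foldl (fun save_dict kv =>
    let key := kv.1
    let value := kv.2
    if simple_out then
      let zero_count := value.foldl (fun zc i => if PySem.Str.isIn ":0" i then zc + 1 else zc) (0 : Int)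
      save_dict.insert key [("zero", zero_count)]
    else
      let (new_c, worked, exact, _missing, failed, noblast, dup, toomuch, toolong) :=
        value.foldl pvStepA (0, 0, 0, 0, 0, 0, 0, 0, 0)
      save_dict.insert key [("worked", worked), ("new", new_c), ("exact", exact),
        ("unscorable_too_much_missing", toomuch), ("unscorable_too_long", toolong),
        ("no_blast_hits", noblast), ("possible_duplication", dup), ("failed_filter", failed)])
    PySem.Dict.empty).items

-- ===== PORT B =====
def pvClassify (i : String) : String :=
  if PySem.Str.isIn ":0" i then
    if PySem.Str.isIn "failed_filter" i then "failed_filter"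
    else if PySem.Str.isIn "possible_duplication" i then "possible_duplication"
    else if PySem.Str.isIn "no_blast_hits" i then "no_blast_hits"
    else if PySem.Str.isIn "unscorable_too_much_missing" i then "unscorable_too_much_missing"
    else if PySem.Str.isIn "unscorable_too_long" i then "unscorable_too_long"
    else "missing_other"
  else if PySem.Str.isIn "new" i then "new"
  else if PySem.Str.isIn ":1" i then "exact"
  else "worked_other"

def calculate_missing_info_alt (genome_alleles_dict : List (String × List String)) (simple_out : Bool) : List (String × List (String × Int)) :=
  (genome_alleles_dict.foldl (fun save_dict kv =>
    if simple_out then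
      save_dict.insert kv.1 [("zero", (kv.2.countP (fun i => PySem.Str.isIn ":0" i) : Int))]
    else
      let labels := kv.2.map pvClassify
      let missing_total : Int :=
        (labels.count "failed_filter" : Int) + (labels.count "possible_duplication" : Int)
        + (labels.count "no_blast_hits" : Int) + (labels.count "unscorable_too_much_missing" : Int)
        + (labels.count "unscorable_too_long" : Int) + (labels.count "missing_other" : Int)
      save_dict.insert kv.1 [("worked", (labels.length : Int) - missing_total),
        ("new", (labels.count "new" : Int)), ("exact", (labels.count "exact" : Int)),
        ("unscorable_too_much_missing", (labels.count "unscorable_too_much_missing" : Int)),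
        ("unscorable_too_long", (labels.count "unscorable_too_long" : Int)),
        ("no_blast_hits", (labels.count "no_blast_hits" : Int)),
        ("possible_duplication", (labels.count "possible_duplication" : Int)),
        ("failed_filter", (labels.count "failed_filter" : Int))])
    PySem.Dict.empty).items

-- ===== PRECONDITION & SPEC =====
def Spec_calculate_missing_info (genome_alleles_dict : List (String × List String)) (simple_out : Bool) (out : List (String × List (String × Int))) : Prop := out = calculate_missing_info_alt genome_alleles_dict simple_out
instance (genome_alleles_dict : List (String × List String)) (simple_out : Bool) (out : List (String × List (String × Int))) : Decidable (Spec_calculate_missing_info genome_alleles_dict simple_out out) := by unfold Spec_calculate_missing_info; infer_instance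

-- ===== CLAIM (what is proved, stated in full; the proofs are below) =====
def Claim_equal_calculate_missing_info : Prop := ∀ (genome_alleles_dict : List (String × List String)) (simple_out : Bool), Dom_calculate_missing_info genome_alleles_dict simple_out → Spec_calculate_missing_info genome_alleles_dict simple_out (calculate_missing_info genome_alleles_dict simple_out)

-- ===== LEMMAS AND PROOFS =====\n
-- generic count-on-map fact specialised to strings (used to read B's label tallies as countP on value)
theorem pv_count_map (l : List String) (f : String → String) (t : String) :
    (l.map f).count t = l.countP (fun i => f i == t) := by
  simp only [List.count, List.countP_map]
  rfl

-- the worked and missing tallies partition the list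
theorem pv_countP_split (l : List String) (p : String → Bool) :
    l.countP p + l.countP (fun a => !p a) = l.length := by
  induction l with
  | nil => simp
  | cons a l ih => by_cases h : p a <;> simp [List.countP_cons, h] <;> omega

-- A's counter loop computed as label counts (classify-then-tally).
theorem pvStepA_foldl (value : List String) (n w e m f nb d tm tl : Int) :
    value.foldl pvStepA (n, w, e, m, f, nb, d, tm, tl) =
      (n + (value.countP (fun i => pvClassify i == "new") : Int),
       w + (value.countP (fun i => !PySem.Str.isIn ":0" i) : Int),
       e + (value.countP (fun i => pvClassify i == "exact") : Int),
       m + (value.countP (fun i => PySem.Str.isIn ":0" i) : Int),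
       f + (value.countP (fun i => pvClassify i == "failed_filter") : Int),
       nb + (value.countP (fun i => pvClassify i == "no_blast_hits") : Int),
       d + (value.countP (fun i => pvClassify i == "possible_duplication") : Int),
       tm + (value.countP (fun i => pvClassify i == "unscorable_too_much_missing") : Int),
       tl + (value.countP (fun i => pvClassify i == "unscorable_too_long") : Int)) := by
  induction value generalizing n w e m f nb d tm tl with
  | nil => simp
  | cons i rest ih =>
    rw [List.foldl_cons]
    by_cases h0 : PySem.Str.isIn ":0" i
    · by_cases h1 : PySem.Str.isIn "failed_filter" i
      · have hc : pvClassify i = "failed_filter" := by unfold pvClassify; rw [if_pos h0, if_pos h1]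
        simp only [pvStepA, Bool.not_true, Bool.not_false, Bool.false_eq_true, reduceIte, *]
        simp only [List.countP_cons, hc, String.reduceBEq, Bool.false_eq_true, reduceIte, Bool.not_true, Bool.not_false, *]
        push_cast
        simp only [Prod.mk.injEq]
        omega
      · by_cases h2 : PySem.Str.isIn "possible_duplication" i
        · have hc : pvClassify i = "possible_duplication" := by unfold pvClassify; rw [if_pos h0, if_neg h1, if_pos h2]
          simp only [pvStepA, Bool.not_true, Bool.not_false, Bool.false_eq_true, reduceIte, *]
          simp only [List.countP_cons, hc, String.reduceBEq, Bool.false_eq_true, reduceIte, Bool.not_true, Bool.not_false, *]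
          push_cast
          simp only [Prod.mk.injEq]
          omega
        · by_cases h3 : PySem.Str.isIn "no_blast_hits" i
          · have hc : pvClassify i = "no_blast_hits" := by unfold pvClassify; rw [if_pos h0, if_neg h1, if_neg h2, if_pos h3]
            simp only [pvStepA, Bool.not_true, Bool.not_false, Bool.false_eq_true, reduceIte, *]
            simp only [List.countP_cons, hc, String.reduceBEq, Bool.false_eq_true, reduceIte, Bool.not_true, Bool.not_false, *]
            push_cast
            simp only [Prod.mk.injEq]
            omega
          · by_cases h4 : PySem.Str.isIn "unscorable_too_much_missing" i
            · have hc : pvClassify i = "unscorable_too_much_missing" := by unfold pvClassify; rw [if_pos h0, if_neg h1, if_neg h2, if_neg h3, if_pos h4]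
              simp only [pvStepA, Bool.not_true, Bool.not_false, Bool.false_eq_true, reduceIte, *]
              simp only [List.countP_cons, hc, String.reduceBEq, Bool.false_eq_true, reduceIte, Bool.not_true, Bool.not_false, *]
              push_cast
              simp only [Prod.mk.injEq]
              omega
            · by_cases h5 : PySem.Str.isIn "unscorable_too_long" i
              · have hc : pvClassify i = "unscorable_too_long" := by unfold pvClassify; rw [if_pos h0, if_neg h1, if_neg h2, if_neg h3, if_neg h4, if_pos h5]
                simp only [pvStepA, Bool.not_true, Bool.not_false, Bool.false_eq_true, reduceIte, *]
                simp only [List.countP_cons, hc, String.reduceBEq, Bool.false_eq_true, reduceIte, Bool.not_true, Bool.not_false, *]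
                push_cast
                simp only [Prod.mk.injEq]
                omega
              · have hc : pvClassify i = "missing_other" := by unfold pvClassify; rw [if_pos h0, if_neg h1, if_neg h2, if_neg h3, if_neg h4, if_neg h5]
                simp only [pvStepA, Bool.not_true, Bool.not_false, Bool.false_eq_true, reduceIte, *]
                simp only [List.countP_cons, hc, String.reduceBEq, Bool.false_eq_true, reduceIte, Bool.not_true, Bool.not_false, *]
                push_cast
                simp only [Prod.mk.injEq]
                omega
    · by_cases h6 : PySem.Str.isIn "new" i
      · have hc : pvClassify i = "new" := by unfold pvClassify; rw [if_neg h0, if_pos h6]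
        simp only [pvStepA, Bool.not_true, Bool.not_false, Bool.false_eq_true, reduceIte, *]
        simp only [List.countP_cons, hc, String.reduceBEq, Bool.false_eq_true, reduceIte, Bool.not_true, Bool.not_false, *]
        push_cast
        simp only [Prod.mk.injEq]
        omega
      · by_cases h7 : PySem.Str.isIn ":1" i
        · have hc : pvClassify i = "exact" := by unfold pvClassify; rw [if_neg h0, if_neg h6, if_pos h7]
          simp only [pvStepA, Bool.not_true, Bool.not_false, Bool.false_eq_true, reduceIte, *]
          simp only [List.countP_cons, hc, String.reduceBEq, Bool.false_eq_true, reduceIte, Bool.not_true, Bool.not_false, *]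
          push_cast
          simp only [Prod.mk.injEq]
          omega
        · have hc : pvClassify i = "worked_other" := by unfold pvClassify; rw [if_neg h0, if_neg h6, if_neg h7]
          simp only [pvStepA, Bool.not_true, Bool.not_false, Bool.false_eq_true, reduceIte, *]
          simp only [List.countP_cons, hc, String.reduceBEq, Bool.false_eq_true, reduceIte, Bool.not_true, Bool.not_false, *]
          push_cast
          simp only [Prod.mk.injEq]
          omega

-- the six missing labels tally exactly the ':0' alleles
theorem pv_missing_sum (value : List String) :
    value.countP (fun i => pvClassify i == "failed_filter")
    + value.countP (fun i => pvClassify i == "possible_duplication")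
    + value.countP (fun i => pvClassify i == "no_blast_hits")
    + value.countP (fun i => pvClassify i == "unscorable_too_much_missing")
    + value.countP (fun i => pvClassify i == "unscorable_too_long")
    + value.countP (fun i => pvClassify i == "missing_other")
    = value.countP (fun i => PySem.Str.isIn ":0" i) := by
  induction value with
  | nil => simp
  | cons i rest ih =>
    by_cases h0 : PySem.Str.isIn ":0" i
    · by_cases h1 : PySem.Str.isIn "failed_filter" i
      · have hc : pvClassify i = "failed_filter" := by unfold pvClassify; rw [if_pos h0, if_pos h1]
        simp only [List.countP_cons, String.reduceBEq, Bool.false_eq_true, reduceIte, *]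
        omega
      · by_cases h2 : PySem.Str.isIn "possible_duplication" i
        · have hc : pvClassify i = "possible_duplication" := by unfold pvClassify; rw [if_pos h0, if_neg h1, if_pos h2]
          simp only [List.countP_cons, String.reduceBEq, Bool.false_eq_true, reduceIte, *]
          omega
        · by_cases h3 : PySem.Str.isIn "no_blast_hits" i
          · have hc : pvClassify i = "no_blast_hits" := by unfold pvClassify; rw [if_pos h0, if_neg h1, if_neg h2, if_pos h3]
            simp only [List.countP_cons, String.reduceBEq, Bool.false_eq_true, reduceIte, *]
            omega
          · by_cases h4 : PySem.Str.isIn "unscorable_too_much_missing" i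
            · have hc : pvClassify i = "unscorable_too_much_missing" := by unfold pvClassify; rw [if_pos h0, if_neg h1, if_neg h2, if_neg h3, if_pos h4]
              simp only [List.countP_cons, String.reduceBEq, Bool.false_eq_true, reduceIte, *]
              omega
            · by_cases h5 : PySem.Str.isIn "unscorable_too_long" i
              · have hc : pvClassify i = "unscorable_too_long" := by unfold pvClassify; rw [if_pos h0, if_neg h1, if_neg h2, if_neg h3, if_neg h4, if_pos h5]
                simp only [List.countP_cons, String.reduceBEq, Bool.false_eq_true, reduceIte, *]
                omega
              · have hc : pvClassify i = "missing_other" := by unfold pvClassify; rw [if_pos h0, if_neg h1, if_neg h2, if_neg h3, if_neg h4, if_neg h5]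
                simp only [List.countP_cons, String.reduceBEq, Bool.false_eq_true, reduceIte, *]
                omega
    · by_cases h6 : PySem.Str.isIn "new" i
      · have hc : pvClassify i = "new" := by unfold pvClassify; rw [if_neg h0, if_pos h6]
        simp only [List.countP_cons, String.reduceBEq, Bool.false_eq_true, reduceIte, *]
        omega
      · by_cases h7 : PySem.Str.isIn ":1" i
        · have hc : pvClassify i = "exact" := by unfold pvClassify; rw [if_neg h0, if_neg h6, if_pos h7]
          simp only [List.countP_cons, String.reduceBEq, Bool.false_eq_true, reduceIte, *]
          omega
        · have hc : pvClassify i = "worked_other" := by unfold pvClassify; rw [if_neg h0, if_neg h6, if_neg h7]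
          simp only [List.countP_cons, String.reduceBEq, Bool.false_eq_true, reduceIte, *]
          omega

-- ===== VERDICT (by name: the statement is the Claim_ definition above) =====
theorem calculate_missing_info_spec : Claim_equal_calculate_missing_info := by
  intro gad simple_out _
  unfold Spec_calculate_missing_info calculate_missing_info calculate_missing_info_alt
  congr 1
  apply PySem.List.foldl_congr_mem
  intro save_dict kv _
  cases simple_out with
  | true =>
    simp only [reduceIte]
    rw [PySem.List.foldl_if_add_one]
    simp only [zero_add]
  | false =>
    simp only [Bool.false_eq_true, reduceIte, pvStepA_foldl]
    have hmap := fun t => pv_count_map kv.2 pvClassify t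
    simp only [List.length_map, hmap]
    have hsum := pv_missing_sum kv.2
    have hsplit : kv.2.countP (fun i => PySem.Str.isIn ":0" i) + kv.2.countP (fun i => !PySem.Str.isIn ":0" i) = kv.2.length := pv_countP_split kv.2 _
    congr 1
    simp only [zero_add, List.cons.injEq, Prod.mk.injEq, true_and, and_true]
    omega
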